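-- pv_equiv track=rewrite | github.com/Kapil-Pathak/GeeksForGeeks | Recursion_Special Keyboard.py | optimalKeys
-- ===== SOURCE A (Python) =====
-- def optimalKeys(N):
--     screen = [0]*N
--     # code here
--     if N<= 6:
--         return N
--     for i in range(1, 7):
--         screen[i-1] = i
--     for i in range(7, N+1):
--         screen[i-1] = 0
--         for b in range(N-3, 0, -1):
--             curr = (i-b-1)*screen[b-1]
--             if curr>screen[i-1]:
--                 screen[i-1] = curr
--     return screen[N-1]
-- ===== SOURCE B (Python) =====
-- def optimalKeys(N):
--     # O(N) sliding-window DP: an optimal last copy-paste block uses a small fixed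
--     # multiplier, so only the last five dp values need keeping.
--     if N <= 6:
--         return N
--     a, b, c, d, e = 2, 3, 4, 5, 6   # dp[i-5], dp[i-4], dp[i-3], dp[i-2], dp[i-1]
--     for _ in range(7, N + 1):
--         a, b, c, d, e = b, c, d, e, max(3 * b, 4 * a)
--     return e
-- ===== Notes on version B (the rewrite author's own statement) =====
-- stated objective: faster
-- what changed: Replaces A's quadratic scan over all breakpoints for every i by a sliding window of the last five DP values, using that an optimal final copy-paste block always has a small fixed multiplier, so only two window entries need checking.
import Mathlib
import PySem

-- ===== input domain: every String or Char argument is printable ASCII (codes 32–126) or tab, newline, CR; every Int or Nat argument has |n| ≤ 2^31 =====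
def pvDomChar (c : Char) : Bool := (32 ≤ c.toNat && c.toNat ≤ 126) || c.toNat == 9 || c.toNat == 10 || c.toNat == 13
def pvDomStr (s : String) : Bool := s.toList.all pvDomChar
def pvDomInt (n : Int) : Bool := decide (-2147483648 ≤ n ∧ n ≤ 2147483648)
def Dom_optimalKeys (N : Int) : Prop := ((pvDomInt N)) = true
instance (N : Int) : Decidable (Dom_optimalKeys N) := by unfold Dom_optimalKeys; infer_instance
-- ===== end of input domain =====

-- B replaces A's quadratic all-breakpoints scan by an O(N) sliding-window DP over
-- the last five values (only two nearby breakpoints can be optimal); equality is proved below.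

-- ===== PORT A =====
def optimalKeys (N : Int) : Int :=
  let screen : List Int := List.replicate N.toNat 0
  if N ≤ 6 then N
  else
    let screen := (PySem.List.pyRange 1 7 1).foldl
      (fun s i => PySem.List.pySetD s (i - 1) i) screen
    let screen := (PySem.List.pyRange 7 (N + 1) 1).foldl (fun s i =>
      let s := PySem.List.pySetD s (i - 1) 0
      (PySem.List.pyRange (N - 3) 0 (-1)).foldl (fun s b =>
        let curr := (i - b - 1) * PySem.List.pyGetD s (b - 1) 0
        if curr > PySem.List.pyGetD s (i - 1) 0
        then PySem.List.pySetD s (i - 1) curr else s) s) screen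
    PySem.List.pyGetD screen (N - 1) 0

-- ===== PORT B =====
def altLoop : Nat → Int → Int → Int → Int → Int → Int
  | 0, _, _, _, _, e => e
  | n + 1, a, b, c, d, e => altLoop n b c d e (max (3 * b) (4 * a))

def optimalKeys_alt (N : Int) : Int :=
  if N ≤ 6 then N else altLoop (N - 6).toNat 2 3 4 5 6

-- ===== PRECONDITION & SPEC =====
def Spec_optimalKeys (N : Int) (out : Int) : Prop := out = optimalKeys_alt N
instance (N : Int) (out : Int) : Decidable (Spec_optimalKeys N out) := by unfold Spec_optimalKeys; infer_instance

-- ===== CLAIM (what is proved, stated in full; the proofs are below) =====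
def Claim_equal_optimalKeys : Prop := ∀ (N : Int), Dom_optimalKeys N → Spec_optimalKeys N (optimalKeys N)

-- ===== LEMMAS AND PROOFS =====

-- the DP sequence both programs compute
def fkey (n : Nat) : Int :=
  if n ≤ 6 then (n : Int) else max (3 * fkey (n - 4)) (4 * fkey (n - 5))
decreasing_by all_goals omega

theorem fkey_le6 (n : Nat) (h : n ≤ 6) : fkey n = (n : Int) := by
  rw [fkey]; simp [h]

theorem fkey_ge7 (n : Nat) (h : 7 ≤ n) : fkey n = max (3 * fkey (n - 4)) (4 * fkey (n - 5)) := by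
  rw [fkey]; simp [Nat.not_le.mpr (by omega : 6 < n)]

theorem fkey_nonneg (n : Nat) : 0 ≤ fkey n := by
  induction n using Nat.strong_induction_on with
  | _ n ih =>
    by_cases h : n ≤ 6
    · rw [fkey_le6 n h]; positivity
    · rw [fkey_ge7 n (by omega)]
      have h1 := ih (n - 4) (by omega)
      have h2 := ih (n - 5) (by omega)
      omega

theorem fkey7 : fkey 7 = 9 := by rw [fkey_ge7 7 (by norm_num)]; norm_num [fkey_le6]
theorem fkey8 : fkey 8 = 12 := by rw [fkey_ge7 8 (by norm_num)]; norm_num [fkey_le6]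
theorem fkey9 : fkey 9 = 16 := by rw [fkey_ge7 9 (by norm_num)]; norm_num [fkey_le6]
theorem fkey10 : fkey 10 = 20 := by rw [fkey_ge7 10 (by norm_num)]; norm_num [fkey_le6]
theorem fkey11 : fkey 11 = 27 := by rw [fkey_ge7 11 (by norm_num)]; norm_num [fkey_le6, fkey7]

-- growth ratio 5/4 per keystroke, valid from n = 6 on (it fails at n = 5)
theorem fkey_ratio6 (n : Nat) (h : 6 ≤ n) : 5 * fkey n ≤ 4 * fkey (n + 1) := by
  induction n using Nat.strong_induction_on with
  | _ n ih =>
    by_cases hn : n ≤ 10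
    · interval_cases n <;>
        simp [fkey_le6, fkey7, fkey8, fkey9, fkey10, fkey11] <;> norm_num
    · have h4 : 6 ≤ n - 4 := by omega
      have h5 : 6 ≤ n - 5 := by omega
      have ih4 := ih (n - 4) (by omega) h4
      have ih5 := ih (n - 5) (by omega) h5
      have e4 : n - 4 + 1 = n - 3 := by omega
      have e5 : n - 5 + 1 = n - 4 := by omega
      rw [e4] at ih4; rw [e5] at ih5
      have hn1 : fkey (n + 1) = max (3 * fkey (n - 3)) (4 * fkey (n - 4)) := by
        rw [fkey_ge7 (n + 1) (by omega)]
        congr 3 <;> omega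
      have hn0 : fkey n = max (3 * fkey (n - 4)) (4 * fkey (n - 5)) :=
        fkey_ge7 n (by omega)
      rcases max_choice (3 * fkey (n - 4)) (4 * fkey (n - 5)) with hc | hc <;> rw [hc] at hn0
      · have hle : 3 * fkey (n - 3) ≤ fkey (n + 1) := by rw [hn1]; exact le_max_left _ _
        linarith
      · have hle : 4 * fkey (n - 4) ≤ fkey (n + 1) := by rw [hn1]; exact le_max_right _ _
        linarith

theorem fkey_mono_succ (n : Nat) (h : 1 ≤ n) : fkey n ≤ fkey (n + 1) := by
  by_cases hn : n ≤ 5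
  · rw [fkey_le6 n (by omega), fkey_le6 (n + 1) (by omega)]; push_cast; omega
  · have := fkey_ratio6 n (by omega)
    have := fkey_nonneg n
    linarith

theorem fkey_mono (a b : Nat) (ha : 1 ≤ a) (hab : a ≤ b) : fkey a ≤ fkey b := by
  induction b, hab using Nat.le_induction with
  | base => exact le_refl _
  | succ m hm ih => exact le_trans ih (fkey_mono_succ m (by omega))

theorem fkey_L5 (b : Nat) (hb : 1 ≤ b) : 5 * fkey b ≤ fkey (b + 6) := by
  by_cases h : b ≤ 5
  · interval_cases b <;>
      simp [fkey_le6, fkey7, fkey8, fkey9, fkey10, fkey11] <;> norm_num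
  · have hr := fkey_ratio6 b (by omega)
    have hge : fkey (b + 6) = max (3 * fkey (b + 2)) (4 * fkey (b + 1)) := by
      rw [fkey_ge7 (b + 6) (by omega)]; congr 3 <;> omega
    have hle : 4 * fkey (b + 1) ≤ fkey (b + 6) := by rw [hge]; exact le_max_right _ _
    linarith

theorem fkey_kbound (m b : Nat) (hb : 1 ≤ b) :
    (5 + (m : Int)) * fkey b ≤ fkey (b + 6 + m) := by
  induction m with
  | zero => simpa using fkey_L5 b hb
  | succ m ih =>
    have hr := fkey_ratio6 (b + 6 + m) (by omega)
    have hfb := fkey_nonneg b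
    have hfn := fkey_nonneg (b + 6 + m)
    have e : b + 6 + (m + 1) = b + 6 + m + 1 := by omega
    rw [e]
    push_cast
    nlinarith [ih]

theorem fkey_two (n : Nat) (h : 1 ≤ n) : 2 * fkey n ≤ fkey (n + 3) := by
  induction n using Nat.strong_induction_on with
  | _ n ih =>
    by_cases hn : n ≤ 6
    · interval_cases n <;>
        simp [fkey_le6, fkey7, fkey8, fkey9, fkey10, fkey11] <;> norm_num
    · have ih4 := ih (n - 4) (by omega) (by omega)
      have ih5 := ih (n - 5) (by omega) (by omega)
      have e4 : n - 4 + 3 = n - 1 := by omega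
      have e5 : n - 5 + 3 = n - 2 := by omega
      rw [e4] at ih4; rw [e5] at ih5
      have hn3 : fkey (n + 3) = max (3 * fkey (n - 1)) (4 * fkey (n - 2)) := by
        rw [fkey_ge7 (n + 3) (by omega)]; congr 3 <;> omega
      have hn0 : fkey n = max (3 * fkey (n - 4)) (4 * fkey (n - 5)) :=
        fkey_ge7 n (by omega)
      rcases max_choice (3 * fkey (n - 4)) (4 * fkey (n - 5)) with hc | hc <;> rw [hc] at hn0
      · have hle : 3 * fkey (n - 1) ≤ fkey (n + 3) := by rw [hn3]; exact le_max_left _ _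
        linarith
      · have hle : 4 * fkey (n - 2) ≤ fkey (n + 3) := by rw [hn3]; exact le_max_right _ _
        linarith

-- dominance: no breakpoint beats the two kept by the window
theorem fkey_dom (i b : Nat) (hi : 7 ≤ i) (hb : 1 ≤ b) :
    ((i : Int) - b - 1) * fkey b ≤ fkey i := by
  have hfi : 0 ≤ fkey i := fkey_nonneg i
  have hfb : 0 ≤ fkey b := fkey_nonneg b
  by_cases h0 : i ≤ b + 1
  · have : ((i : Int) - b - 1) ≤ 0 := by push_cast; omega
    calc ((i : Int) - b - 1) * fkey b ≤ 0 := mul_nonpos_of_nonpos_of_nonneg this hfb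
      _ ≤ fkey i := hfi
  · have hmax : fkey i = max (3 * fkey (i - 4)) (4 * fkey (i - 5)) := fkey_ge7 i hi
    by_cases h2 : b = i - 2
    · subst h2
      have e : ((i : Int) - (i - 2 : Nat) - 1) = 1 := by push_cast; omega
      rw [e, one_mul]
      exact fkey_mono (i - 2) i (by omega) (by omega)
    · by_cases h3 : b = i - 3
      · subst h3
        have e : ((i : Int) - (i - 3 : Nat) - 1) = 2 := by push_cast; omega
        rw [e]
        have := fkey_two (i - 3) (by omega)
        have e2 : i - 3 + 3 = i := by omega
        rwa [e2] at this
      · by_cases h4 : b = i - 4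
        · subst h4
          have e : ((i : Int) - (i - 4 : Nat) - 1) = 3 := by push_cast; omega
          rw [e, hmax]
          exact le_max_left _ _
        · by_cases h5 : b = i - 5
          · subst h5
            have e : ((i : Int) - (i - 5 : Nat) - 1) = 4 := by push_cast; omega
            rw [e, hmax]
            exact le_max_right _ _
          · -- b ≤ i - 6
            have hb6 : b + 6 ≤ i := by omega
            have hk := fkey_kbound (i - 6 - b) b hb
            have e1 : b + 6 + (i - 6 - b) = i := by omega
            rw [e1] at hk
            have e2 : ((i : Int) - b - 1) = 5 + ((i - 6 - b : Nat) : Int) := by push_cast; omega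
            rw [e2]
            exact hk


-- ---------- B side: the sliding window computes fkey ----------

theorem altLoop_eq (k : Nat) : ∀ j : Nat, 2 ≤ j →
    altLoop k (fkey j) (fkey (j + 1)) (fkey (j + 2)) (fkey (j + 3)) (fkey (j + 4))
      = fkey (j + 4 + k) := by
  induction k with
  | zero => intro j hj; simp [altLoop]
  | succ k ih =>
    intro j hj
    have h5 : max (3 * fkey (j + 1)) (4 * fkey j) = fkey (j + 5) := by
      rw [fkey_ge7 (j + 5) (by omega)]
      congr 3 <;> omega
    show altLoop k (fkey (j + 1)) (fkey (j + 2)) (fkey (j + 3)) (fkey (j + 4))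
        (max (3 * fkey (j + 1)) (4 * fkey j)) = fkey (j + 4 + (k + 1))
    rw [h5]
    have := ih (j + 1) (by omega)
    have e : j + 1 + 4 + k = j + 4 + (k + 1) := by omega
    rw [e] at this
    exact this

theorem alt_eq_fkey (N : Int) (h : 7 ≤ N) : optimalKeys_alt N = fkey N.toNat := by
  unfold optimalKeys_alt
  rw [if_neg (by omega)]
  have key := altLoop_eq (N - 6).toNat 2 (by norm_num)
  rw [fkey_le6 2 (by norm_num), fkey_le6 3 (by norm_num), fkey_le6 4 (by norm_num),
      fkey_le6 5 (by norm_num), fkey_le6 6 (by norm_num)] at key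
  norm_num at key
  rw [key]
  congr 1
  omega

-- ---------- the model screen after outer iteration i ----------

def mkS (n i : Nat) : List Int :=
  (List.range n).map (fun j => if j + 1 ≤ i then fkey (j + 1) else 0)

theorem length_mkS (n i : Nat) : (mkS n i).length = n := by simp [mkS]

theorem getElem_mkS (n i j : Nat) (h : j < n) :
    (mkS n i)[j]'(by simp [length_mkS, h]) = if j + 1 ≤ i then fkey (j + 1) else 0 := by
  simp [mkS]

-- ---------- running-max scalar fold ----------

theorem foldl_rmax_le (t : Int → Int) (L : List Int) (c : Int) :
    ∀ r, r ≤ c → (∀ b ∈ L, t b ≤ c) →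
      L.foldl (fun r b => if t b > r then t b else r) r ≤ c := by
  induction L with
  | nil => intro r hr _; simpa using hr
  | cons x L ih =>
    intro r hr hb
    simp only [List.foldl_cons]
    split_ifs
    · exact ih (t x) (hb x (by simp)) (fun b h => hb b (by simp [h]))
    · exact ih r hr (fun b h => hb b (by simp [h]))

theorem le_foldl_rmax_init (t : Int → Int) (L : List Int) :
    ∀ r, r ≤ L.foldl (fun r b => if t b > r then t b else r) r := by
  induction L with
  | nil => intro r; simp
  | cons x L ih =>
    intro r
    simp only [List.foldl_cons]
    split_ifs with h
    · exact le_trans (le_of_lt h) (ih (t x))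
    · exact ih r


theorem t_le_foldl_rmax (t : Int → Int) (L : List Int) (x : Int) (hx : x ∈ L) :
    ∀ r, t x ≤ L.foldl (fun r b => if t b > r then t b else r) r := by
  induction L with
  | nil => cases hx
  | cons y L ih =>
    intro r
    simp only [List.foldl_cons]
    rcases List.mem_cons.mp hx with h | h
    · subst h
      split_ifs with hc
      · exact le_foldl_rmax_init t L (t x)
      · exact le_trans (not_lt.mp hc) (le_foldl_rmax_init t L r)
    · exact ih h _

-- ---------- the inner b-loop only ever rewrites cell i-1: extract a scalar fold ----------

theorem inner_fold (i : Int) (base : List Int) (hi : 7 ≤ i)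
    (hlen : i ≤ (base.length : Int))
    (hbase0 : PySem.List.pyGetD base (i - 1) 0 = 0) :
    ∀ (L : List Int), (∀ b ∈ L, 1 ≤ b ∧ b ≤ (base.length : Int)) →
    ∀ r : Int, 0 ≤ r →
    L.foldl (fun s b =>
        if (i - b - 1) * PySem.List.pyGetD s (b - 1) 0 > PySem.List.pyGetD s (i - 1) 0
        then PySem.List.pySetD s (i - 1) ((i - b - 1) * PySem.List.pyGetD s (b - 1) 0)
        else s)
      (PySem.List.pySetD base (i - 1) r)
    = PySem.List.pySetD base (i - 1)
        (L.foldl (fun r b =>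
            if (i - b - 1) * PySem.List.pyGetD base (b - 1) 0 > r
            then (i - b - 1) * PySem.List.pyGetD base (b - 1) 0 else r) r) := by
  intro L
  induction L with
  | nil => intro _ r _; simp
  | cons b L ih =>
    intro hL r hr
    have hb := (hL b (by simp)).1
    have hbu := (hL b (by simp)).2
    have hidx : (i - 1).toNat < base.length := by omega
    have hcast : ((i - 1).toNat : Int) = i - 1 := by omega
    have hget_set : ∀ (m v : Int), 0 ≤ m → m < (base.length : Int) →
        PySem.List.pyGetD (PySem.List.pySetD base (i - 1) v) m 0
        = if m = i - 1 then v else PySem.List.pyGetD base m 0 := by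
      intro m v hm0 hmlt
      rw [PySem.List.pySetD_of_nonneg base v (by omega : (0 : Int) ≤ i - 1)]
      rw [PySem.List.pyGetD_eq_getElem _ 0 hm0 (by simpa using hmlt)]
      rw [List.getElem_set]
      by_cases h : m = i - 1
      · rw [if_pos (by omega), if_pos h]
      · rw [if_neg (by omega), if_neg h, PySem.List.pyGetD_eq_getElem _ 0 hm0 hmlt]
    simp only [List.foldl_cons]
    by_cases hbi : b = i
    · -- reading the cell being accumulated: curr = -r, never an improvement
      have h1 : PySem.List.pyGetD (PySem.List.pySetD base (i - 1) r) (b - 1) 0 = r := by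
        rw [hget_set _ _ (by omega) (by omega)]; simp [hbi]
      have h2 : PySem.List.pyGetD (PySem.List.pySetD base (i - 1) r) (i - 1) 0 = r := by
        rw [hget_set _ _ (by omega) (by omega)]; simp
      rw [h1, h2]
      have hc1 : ¬ ((i - b - 1) * r > r) := by
        subst hbi; simp only [sub_self, zero_sub]; nlinarith
      rw [if_neg hc1]
      have h3 : PySem.List.pyGetD base (b - 1) 0 = 0 := by subst hbi; exact hbase0
      have hc2 : ¬ ((i - b - 1) * PySem.List.pyGetD base (b - 1) 0 > r) := by
        rw [h3]; simp; omega
      rw [if_neg hc2]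
      exact ih (fun x hx => hL x (by simp [hx])) r hr
    · have h1 : PySem.List.pyGetD (PySem.List.pySetD base (i - 1) r) (b - 1) 0
          = PySem.List.pyGetD base (b - 1) 0 := by
        rw [hget_set _ _ (by omega) (by omega), if_neg (by omega)]
      have h2 : PySem.List.pyGetD (PySem.List.pySetD base (i - 1) r) (i - 1) 0 = r := by
        rw [hget_set _ _ (by omega) (by omega)]; simp
      rw [h1, h2]
      split_ifs with hc
      · have hset : PySem.List.pySetD (PySem.List.pySetD base (i - 1) r) (i - 1)
            ((i - b - 1) * PySem.List.pyGetD base (b - 1) 0)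
            = PySem.List.pySetD base (i - 1) ((i - b - 1) * PySem.List.pyGetD base (b - 1) 0) := by
          rw [← hcast]
          simp [PySem.List.pySetD_natCast, List.set_set]
        rw [hset]
        exact ih (fun x hx => hL x (by simp [hx])) _ (le_trans hr (le_of_lt hc))
      · exact ih (fun x hx => hL x (by simp [hx])) r hr


theorem pyGetD_mkS (n i : Nat) (m : Int) (h0 : 0 ≤ m) (hlt : m < (n : Int)) :
    PySem.List.pyGetD (mkS n i) m 0
      = if m + 1 ≤ (i : Int) then fkey (m.toNat + 1) else 0 := by
  rw [PySem.List.pyGetD_eq_getElem _ 0 h0 (by rw [length_mkS]; exact_mod_cast hlt)]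
  rw [getElem_mkS n i m.toNat (by omega)]
  split_ifs with h1 h2 h2 <;> first | rfl | omega

-- value of the inner running-max fold: exactly fkey i
theorem scalar_eq_fkey (N i : Int) (n : Nat) (hn : (n : Int) = N) (hi7 : 7 ≤ i) (hiN : i ≤ N) :
    (PySem.List.pyRange (N - 3) 0 (-1)).foldl
      (fun r b => if (i - b - 1) * PySem.List.pyGetD (mkS n (i.toNat - 1)) (b - 1) 0 > r
                  then (i - b - 1) * PySem.List.pyGetD (mkS n (i.toNat - 1)) (b - 1) 0 else r) 0
    = fkey i.toNat := by
  have hfi : 0 ≤ fkey i.toNat := fkey_nonneg _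
  have htval : ∀ b : Int, 0 < b → b ≤ N - 3 →
      (i - b - 1) * PySem.List.pyGetD (mkS n (i.toNat - 1)) (b - 1) 0
      = if b ≤ i - 1 then ((i : Int) - b - 1) * fkey b.toNat else 0 := by
    intro b hb1 hb2
    rw [pyGetD_mkS n (i.toNat - 1) (b - 1) (by omega) (by omega)]
    have e : (b - 1).toNat + 1 = b.toNat := by omega
    rw [e]
    split_ifs with h1 h2 h2 <;> first | rfl | omega | ring
  apply le_antisymm
  · apply foldl_rmax_le
      (fun b => (i - b - 1) * PySem.List.pyGetD (mkS n (i.toNat - 1)) (b - 1) 0) _ _ 0 hfi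
    intro b hb
    rcases PySem.List.mem_pyRange_neg_one.mp hb with ⟨hb1, hb2⟩
    rw [htval b hb1 hb2]
    split_ifs with h
    · have := fkey_dom i.toNat b.toNat (by omega) (by omega)
      have e1 : ((i.toNat : Int)) = i := by omega
      have e2 : ((b.toNat : Int)) = b := by omega
      rw [e1, e2] at this
      exact this
    · exact hfi
  · rw [fkey_ge7 i.toNat (by omega)]
    apply max_le
    · have hmem : (i - 4) ∈ PySem.List.pyRange (N - 3) 0 (-1) :=
        PySem.List.mem_pyRange_neg_one.mpr ⟨by omega, by omega⟩
      have := t_le_foldl_rmax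
        (fun b => (i - b - 1) * PySem.List.pyGetD (mkS n (i.toNat - 1)) (b - 1) 0)
        (PySem.List.pyRange (N - 3) 0 (-1)) (i - 4) hmem 0
      simp only at this
      rw [htval (i - 4) (by omega) (by omega), if_pos (by omega)] at this
      have e1 : (i - (i - 4) - 1) = 3 := by ring
      have e2 : (i - 4).toNat = i.toNat - 4 := by omega
      rw [e1, e2] at this
      exact this
    · have hmem : (i - 5) ∈ PySem.List.pyRange (N - 3) 0 (-1) :=
        PySem.List.mem_pyRange_neg_one.mpr ⟨by omega, by omega⟩
      have := t_le_foldl_rmax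
        (fun b => (i - b - 1) * PySem.List.pyGetD (mkS n (i.toNat - 1)) (b - 1) 0)
        (PySem.List.pyRange (N - 3) 0 (-1)) (i - 5) hmem 0
      simp only at this
      rw [htval (i - 5) (by omega) (by omega), if_pos (by omega)] at this
      have e1 : (i - (i - 5) - 1) = 4 := by ring
      have e2 : (i - 5).toNat = i.toNat - 5 := by omega
      rw [e1, e2] at this
      exact this

theorem set_mkS (n : Nat) (i : Int) (hi7 : 7 ≤ i) (_hin : i ≤ (n : Int)) :
    PySem.List.pySetD (mkS n (i.toNat - 1)) (i - 1) (fkey i.toNat) = mkS n i.toNat := by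
  rw [PySem.List.pySetD_of_nonneg _ _ (by omega : (0 : Int) ≤ i - 1)]
  apply List.ext_getElem
  · simp [length_mkS]
  · intro j h1 h2
    have hjn : j < n := by simpa [length_mkS] using h2
    rw [List.getElem_set, getElem_mkS n i.toNat j hjn]
    by_cases hj : j = i.toNat - 1
    · rw [if_pos (by omega), if_pos (by omega)]
      congr 1
      omega
    · rw [if_neg (by omega), getElem_mkS n (i.toNat - 1) j hjn]
      split_ifs <;> first | rfl | omega

-- one outer iteration sends the model screen for i-1 to the model screen for i
theorem outer_step (N i : Int) (n : Nat) (hn : (n : Int) = N) (hi7 : 7 ≤ i) (hiN : i ≤ N) :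
    (PySem.List.pyRange (N - 3) 0 (-1)).foldl
      (fun s b =>
        if (i - b - 1) * PySem.List.pyGetD s (b - 1) 0 > PySem.List.pyGetD s (i - 1) 0
        then PySem.List.pySetD s (i - 1) ((i - b - 1) * PySem.List.pyGetD s (b - 1) 0)
        else s)
      (PySem.List.pySetD (mkS n (i.toNat - 1)) (i - 1) 0)
    = mkS n i.toNat := by
  rw [inner_fold i (mkS n (i.toNat - 1)) hi7 (by rw [length_mkS]; omega)
      (by rw [pyGetD_mkS n (i.toNat - 1) (i - 1) (by omega) (by omega)]
          rw [if_neg (by omega)])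
      (PySem.List.pyRange (N - 3) 0 (-1))
      (by intro b hb
          rcases PySem.List.mem_pyRange_neg_one.mp hb with ⟨hb1, hb2⟩
          rw [length_mkS]
          constructor <;> omega)
      0 (le_refl 0)]
  rw [scalar_eq_fkey N i n hn hi7 hiN]
  exact set_mkS n i hi7 (by omega)

-- the whole outer loop, by induction on its length
theorem outer_fold (N : Int) (n : Nat) (hn : (n : Int) = N) (_hN : 7 ≤ N) :
    ∀ m : Nat, (m : Int) ≤ N - 6 →
    (PySem.List.pyRange 7 (7 + (m : Int)) 1).foldl
      (fun s i =>
        (PySem.List.pyRange (N - 3) 0 (-1)).foldl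
          (fun s b =>
            if (i - b - 1) * PySem.List.pyGetD s (b - 1) 0 > PySem.List.pyGetD s (i - 1) 0
            then PySem.List.pySetD s (i - 1) ((i - b - 1) * PySem.List.pyGetD s (b - 1) 0)
            else s)
          (PySem.List.pySetD s (i - 1) 0))
      (mkS n 6)
    = mkS n (6 + m) := by
  intro m
  induction m with
  | zero =>
    intro _
    rw [show (7 : Int) + (0 : Nat) = 7 by norm_num]
    rw [PySem.List.pyRange_one_eq_nil (le_refl 7)]
    simp
  | succ m ih =>
    intro hm
    have e : (7 : Int) + ((m + 1 : Nat) : Int) = (7 + (m : Int)) + 1 := by push_cast; ring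
    rw [e, PySem.List.pyRange_one_succ_right (by omega), List.foldl_append]
    rw [ih (by push_cast at hm ⊢; omega)]
    have hmk : mkS n (6 + m) = mkS n ((7 + (m : Int)).toNat - 1) := by
      congr 1
      omega
    rw [hmk]
    have := outer_step N (7 + (m : Int)) n hn (by omega) (by push_cast at hm; omega)
    simp only [List.foldl_cons, List.foldl_nil]
    rw [this]
    congr 1
    omega

-- the initialisation loop produces the model screen for i = 6
theorem init_eq (n : Nat) (_hn : 7 ≤ n) :
    (PySem.List.pyRange 1 7 1).foldl (fun s i => PySem.List.pySetD s (i - 1) i)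
      (List.replicate n (0 : Int)) = mkS n 6 := by
  have e : PySem.List.pyRange 1 7 1 = [1, 2, 3, 4, 5, 6] := by decide
  rw [e]
  simp only [List.foldl_cons, List.foldl_nil]
  rw [PySem.List.pySetD_of_nonneg _ _ (by norm_num), PySem.List.pySetD_of_nonneg _ _ (by norm_num),
      PySem.List.pySetD_of_nonneg _ _ (by norm_num), PySem.List.pySetD_of_nonneg _ _ (by norm_num),
      PySem.List.pySetD_of_nonneg _ _ (by norm_num), PySem.List.pySetD_of_nonneg _ _ (by norm_num)]
  norm_num [show Int.toNat 2 = 2 from rfl, show Int.toNat 3 = 3 from rfl,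
    show Int.toNat 4 = 4 from rfl, show Int.toNat 5 = 5 from rfl]
  apply List.ext_getElem
  · simp [length_mkS]
  · intro j h1 h2
    have hjn : j < n := by simpa [length_mkS] using h2
    rw [getElem_mkS n 6 j hjn]
    simp only [List.getElem_set, List.getElem_replicate]
    rcases Nat.lt_or_ge j 6 with hj | hj
    · interval_cases j <;> norm_num [fkey_le6]
    · split_ifs <;> omega

-- A computes fkey too
theorem a_eq_fkey (N : Int) (h7 : 7 ≤ N) : optimalKeys N = fkey N.toNat := by
  have hn : ((N.toNat : Nat) : Int) = N := by omega
  simp only [optimalKeys]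
  rw [if_neg (by omega)]
  rw [init_eq N.toNat (by omega)]
  have em : N + 1 = 7 + (((N - 6).toNat : Nat) : Int) := by omega
  rw [em, outer_fold N N.toNat hn h7 (N - 6).toNat (by omega)]
  have e6 : 6 + (N - 6).toNat = N.toNat := by omega
  rw [e6]
  rw [pyGetD_mkS N.toNat N.toNat (N - 1) (by omega) (by omega)]
  rw [if_pos (by omega)]
  congr 1
  omega

-- ===== VERDICT (by name: the statement is the Claim_ definition above) =====
theorem optimalKeys_spec : Claim_equal_optimalKeys := by
  intro N _
  unfold Spec_optimalKeys
  by_cases h : N ≤ 6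
  · simp only [optimalKeys, optimalKeys_alt]
    rw [if_pos h, if_pos h]
  · rw [a_eq_fkey N (by omega), alt_eq_fkey N (by omega)]
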